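-- pv_equiv track=rewrite | github.com/Phytoritas/model-informed-greenhouse-dashboard | src/model_informed_greenhouse_dashboard/backend/app/services/advisory.py | _summarize_measurement_coverage
-- ===== SOURCE A (Python) =====
-- from typing import Any
--
-- def _summarize_measurement_coverage(rows: list[dict[str, Any]]) -> dict[str, list[str]]:
--     coverage = {
--         "submitted_analytes": [],
--         "baseline_analytes": [],
--         "missing_analytes": [],
--     }
--     for row in rows:
--         analyte = row.get("analyte")
--         if not analyte:
--             continue
--         source_origin = row.get("source_origin")
--         if source_origin == "submitted":
--             coverage["submitted_analytes"].append(analyte)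
--         elif source_origin == "baseline":
--             coverage["baseline_analytes"].append(analyte)
--         else:
--             coverage["missing_analytes"].append(analyte)
--     for key in coverage:
--         coverage[key] = sorted(dict.fromkeys(coverage[key]))
--     return coverage
-- ===== SOURCE B (Python) =====
-- def _summarize_measurement_coverage(rows):
--     def bucket(pred):
--         return sorted(dict.fromkeys(
--             r.get("analyte") for r in rows
--             if r.get("analyte") and pred(r.get("source_origin"))))
--     return {
--         "submitted_analytes": bucket(lambda s: s == "submitted"),
--         "baseline_analytes": bucket(lambda s: s == "baseline"),
--         "missing_analytes": bucket(lambda s: s != "submitted" and s != "baseline"),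
--     }
-- ===== Notes on version B (the rewrite author's own statement) =====
-- stated objective: alternative
-- what changed: Replaces the single loop with mutually-exclusive branches appending into three accumulators by three independent filtered passes over rows (one per source_origin bucket), each a generator expression deduped and sorted directly.
import Mathlib
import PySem

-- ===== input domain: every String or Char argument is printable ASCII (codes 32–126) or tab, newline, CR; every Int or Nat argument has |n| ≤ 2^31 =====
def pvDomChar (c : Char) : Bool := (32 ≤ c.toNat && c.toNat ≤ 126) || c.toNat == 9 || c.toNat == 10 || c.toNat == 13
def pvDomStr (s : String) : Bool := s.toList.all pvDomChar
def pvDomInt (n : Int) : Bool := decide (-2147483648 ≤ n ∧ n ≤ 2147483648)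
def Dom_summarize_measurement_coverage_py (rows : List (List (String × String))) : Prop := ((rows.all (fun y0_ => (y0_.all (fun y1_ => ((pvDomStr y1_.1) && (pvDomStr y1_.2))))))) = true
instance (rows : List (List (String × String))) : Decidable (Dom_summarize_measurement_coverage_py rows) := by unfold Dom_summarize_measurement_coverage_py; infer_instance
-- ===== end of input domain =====

-- B replaces A's single loop with three mutually-exclusive branches by three independent
-- filtered passes over rows, one per bucket (objective: alternative decomposition, same cost).

-- ===== PORT A =====
-- the loop: one pass, three accumulators, append at the end (coverage[...].append(analyte))
def pvBucketsA (rows : List (List (String × String))) : List String × List String × List String :=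
  rows.foldl (fun acc row =>
    let analyte := PySem.Dict.getD ⟨row⟩ "analyte" ""
    if analyte = "" then acc
    else
      let source_origin := PySem.Dict.get? ⟨row⟩ "source_origin"
      if source_origin = some "submitted" then (acc.1 ++ [analyte], acc.2.1, acc.2.2)
      else if source_origin = some "baseline" then (acc.1, acc.2.1 ++ [analyte], acc.2.2)
      else (acc.1, acc.2.1, acc.2.2 ++ [analyte])) ([], [], [])

def summarize_measurement_coverage_py (rows : List (List (String × String))) : List (String × List String) :=
  let c := pvBucketsA rows
  -- for key in coverage: coverage[key] = sorted(dict.fromkeys(coverage[key]))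
  [("submitted_analytes", PySem.List.sorted (PySem.List.dedup c.1) (fun x => x) false),
   ("baseline_analytes", PySem.List.sorted (PySem.List.dedup c.2.1) (fun x => x) false),
   ("missing_analytes", PySem.List.sorted (PySem.List.dedup c.2.2) (fun x => x) false)]

-- ===== PORT B =====
-- one filtered pass per bucket: sorted(dict.fromkeys(r.get("analyte") for r in rows if … and pred(…)))
def pvBucketB (rows : List (List (String × String))) (pred : Option String → Bool) : List String :=
  PySem.List.sorted
    (PySem.List.dedup
      ((rows.filter (fun r =>
          (PySem.Dict.getD ⟨r⟩ "analyte" "" != "") && pred (PySem.Dict.get? ⟨r⟩ "source_origin"))).map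
        (fun r => PySem.Dict.getD ⟨r⟩ "analyte" "")))
    (fun x => x) false

def summarize_measurement_coverage_py_alt (rows : List (List (String × String))) : List (String × List String) :=
  [("submitted_analytes", pvBucketB rows (fun s => s == some "submitted")),
   ("baseline_analytes", pvBucketB rows (fun s => s == some "baseline")),
   ("missing_analytes", pvBucketB rows (fun s => s != some "submitted" && s != some "baseline"))]

-- ===== PRECONDITION & SPEC =====
def Spec_summarize_measurement_coverage_py (rows : List (List (String × String))) (out : List (String × List String)) : Prop := out = summarize_measurement_coverage_py_alt rows
instance (rows : List (List (String × String))) (out : List (String × List String)) : Decidable (Spec_summarize_measurement_coverage_py rows out) := by unfold Spec_summarize_measurement_coverage_py; infer_instance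

-- ===== CLAIM (what is proved, stated in full; the proofs are below) =====
def Claim_equal_summarize_measurement_coverage_py : Prop := ∀ (rows : List (List (String × String))), Dom_summarize_measurement_coverage_py rows → Spec_summarize_measurement_coverage_py rows (summarize_measurement_coverage_py rows)

-- ===== LEMMAS AND PROOFS =====

-- the pre-sort bucket contents as B computes them
def pvRawB (rows : List (List (String × String))) (pred : Option String → Bool) : List String :=
  (rows.filter (fun r =>
      (PySem.Dict.getD ⟨r⟩ "analyte" "" != "") && pred (PySem.Dict.get? ⟨r⟩ "source_origin"))).map
    (fun r => PySem.Dict.getD ⟨r⟩ "analyte" "")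

lemma pvBucketsA_spec (rows : List (List (String × String)))
    (acc : List String × List String × List String) :
    rows.foldl (fun acc row =>
      let analyte := PySem.Dict.getD ⟨row⟩ "analyte" ""
      if analyte = "" then acc
      else
        let source_origin := PySem.Dict.get? ⟨row⟩ "source_origin"
        if source_origin = some "submitted" then (acc.1 ++ [analyte], acc.2.1, acc.2.2)
        else if source_origin = some "baseline" then (acc.1, acc.2.1 ++ [analyte], acc.2.2)
        else (acc.1, acc.2.1, acc.2.2 ++ [analyte])) acc
    = (acc.1 ++ pvRawB rows (fun s => s == some "submitted"),
       acc.2.1 ++ pvRawB rows (fun s => s == some "baseline"),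
       acc.2.2 ++ pvRawB rows (fun s => s != some "submitted" && s != some "baseline")) := by
  induction rows generalizing acc with
  | nil => simp [pvRawB]
  | cons r rs ih =>
    simp only [List.foldl_cons, pvRawB, List.filter_cons]
    by_cases ha : PySem.Dict.getD ⟨r⟩ "analyte" "" = ""
    · simp only [ha]
      simpa [pvRawB, ha] using ih acc
    · by_cases hs : PySem.Dict.get? ⟨r⟩ "source_origin" = some "submitted"
      · simp only [ha, hs]
        simpa [pvRawB, ha, hs] using
          ih (acc.1 ++ [PySem.Dict.getD ⟨r⟩ "analyte" ""], acc.2.1, acc.2.2)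
      · by_cases hb : PySem.Dict.get? ⟨r⟩ "source_origin" = some "baseline"
        · simp only [ha, hb]
          simpa [pvRawB, ha, hs, hb] using
            ih (acc.1, acc.2.1 ++ [PySem.Dict.getD ⟨r⟩ "analyte" ""], acc.2.2)
        · simp only [ha, hs, hb]
          simpa [pvRawB, ha, hs, hb] using
            ih (acc.1, acc.2.1, acc.2.2 ++ [PySem.Dict.getD ⟨r⟩ "analyte" ""])

-- ===== VERDICT (by name: the statement is the Claim_ definition above) =====
theorem summarize_measurement_coverage_py_spec : Claim_equal_summarize_measurement_coverage_py := by
  intro rows _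
  unfold Spec_summarize_measurement_coverage_py
  unfold summarize_measurement_coverage_py summarize_measurement_coverage_py_alt pvBucketsA pvBucketB
  rw [pvBucketsA_spec rows ([], [], [])]
  simp [pvRawB]
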